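-- pv_equiv track=rewrite | github.com/jangsumin/python-coding-test | programmers/Lv1/대충 만든 자판/solution.py | solution
-- ===== SOURCE A (Python) =====
-- def solution(keymap, targets):
--     hash_map = {}
--     for key in keymap:
--         for i in range(len(key)):
--             if key[i] in hash_map:
--                 hash_map[key[i]].append(i + 1)
--             else:
--                 hash_map[key[i]] = [i + 1]
--
--     result = []
--     for target in targets:
--         cnt = 0
--         for i in range(len(target)):
--             if target[i] in hash_map:
--                 cnt += min(hash_map[target[i]])
--             else:
--                 cnt = -1
--                 break
--         result.append(cnt)
--     return result
-- ===== SOURCE B (Python) =====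
-- def solution(keymap, targets):
--     def best(c):
--         positions = [key.index(c) + 1 for key in keymap if c in key]
--         return min(positions) if positions else None
--
--     result = []
--     for target in targets:
--         total = 0
--         for c in target:
--             b = best(c)
--             if b is None:
--                 total = -1
--                 break
--             total += b
--         result.append(total)
--     return result
-- ===== Notes on version B (the rewrite author's own statement) =====
-- stated objective: simpler
-- what changed: B removes A's precomputed char->positions hash table and computes each character's minimum key position on demand by rescanning the keymap (min(key.index(c)+1 for key in keymap if c in key)).
import Mathlib
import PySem

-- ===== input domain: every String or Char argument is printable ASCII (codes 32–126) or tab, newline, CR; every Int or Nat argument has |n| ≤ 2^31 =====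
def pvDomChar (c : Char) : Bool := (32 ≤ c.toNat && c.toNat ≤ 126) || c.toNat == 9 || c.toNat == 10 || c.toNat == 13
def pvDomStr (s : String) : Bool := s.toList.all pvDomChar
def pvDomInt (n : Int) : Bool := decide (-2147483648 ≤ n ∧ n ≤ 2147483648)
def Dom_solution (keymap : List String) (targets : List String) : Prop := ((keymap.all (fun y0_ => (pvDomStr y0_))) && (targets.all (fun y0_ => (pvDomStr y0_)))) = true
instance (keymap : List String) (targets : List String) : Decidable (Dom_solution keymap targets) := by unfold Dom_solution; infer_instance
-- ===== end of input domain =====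

-- B drops A's precomputed position table and instead computes each character's
-- minimum key position by rescanning keymap directly (simpler, no index build).

-- ===== PORT A =====
-- inner loop 'for i in range(len(key))': recursion over the characters with the index i carried along (key[i] is the head)
def buildKey : PySem.Dict Char (List Int) → List Char → Int → PySem.Dict Char (List Int)
  | d, [], _ => d
  | d, c :: rest, i =>
      buildKey (match d.get? c with
        | some l => d.insert c (l ++ [i + 1])
        | none => d.insert c [i + 1]) rest (i + 1)

-- 'for i in range(len(target))' with break: recursion over the characters, cnt accumulated
def aCnt (d : PySem.Dict Char (List Int)) : List Char → Int → Int
  | [], cnt => cnt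
  | c :: rest, cnt =>
      match d.get? c with
      | some l => aCnt d rest (cnt + (PySem.List.min? l (fun x => x)).getD 0)
      | none => -1

def solution (keymap : List String) (targets : List String) : List Int :=
  let hash_map := keymap.foldl (fun d key => buildKey d key.toList 0) PySem.Dict.empty
  targets.foldl (fun result target => result ++ [aCnt hash_map target.toList 0]) []

-- ===== PORT B =====
-- best(c): min(key.index(c)+1 for key in keymap if c in key), None if no key contains c
def bestB (keymap : List String) (c : Char) : Option Int :=
  let positions := (keymap.filter (fun key => c ∈ key.toList)).map
      (fun key => ((PySem.List.index? key.toList c).getD 0 : Int) + 1)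
  PySem.List.min? positions (fun x => x)

def bCnt (keymap : List String) : List Char → Int → Int
  | [], total => total
  | c :: rest, total =>
      match bestB keymap c with
      | none => -1
      | some b => bCnt keymap rest (total + b)

def solution_alt (keymap : List String) (targets : List String) : List Int :=
  targets.foldl (fun result target => result ++ [bCnt keymap target.toList 0]) []

-- ===== PRECONDITION & SPEC =====
def Spec_solution (keymap : List String) (targets : List String) (out : List Int) : Prop := out = solution_alt keymap targets
instance (keymap : List String) (targets : List String) (out : List Int) : Decidable (Spec_solution keymap targets out) := by unfold Spec_solution; infer_instance

-- ===== CLAIM (what is proved, stated in full; the proofs are below) =====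
def Claim_equal_solution : Prop := ∀ (keymap : List String) (targets : List String), Dom_solution keymap targets → Spec_solution keymap targets (solution keymap targets)

-- ===== LEMMAS AND PROOFS =====

-- positions (1-based, offset by i) of c in a string
def strPos (c : Char) : List Char → Int → List Int
  | [], _ => []
  | x :: rest, i => (if x = c then [i + 1] else []) ++ strPos c rest (i + 1)

def allPos (keymap : List String) (c : Char) : List Int :=
  keymap.flatMap (fun k => strPos c k.toList 0)

theorem strPos_lb (c : Char) : ∀ (cs : List Char) (i : Int) (x : Int), x ∈ strPos c cs i → i + 1 ≤ x := by
  intro cs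
  induction cs with
  | nil => intro i x h; simp [strPos] at h
  | cons y rest ih =>
    intro i x h
    simp only [strPos, List.mem_append] at h
    rcases h with h | h
    · split at h <;> simp at h; omega
    · have := ih (i + 1) x h; omega

theorem strPos_eq_nil_iff (c : Char) : ∀ (cs : List Char) (i : Int), strPos c cs i = [] ↔ c ∉ cs := by
  intro cs
  induction cs with
  | nil => intro i; simp [strPos]
  | cons y rest ih =>
    intro i
    simp only [strPos, List.append_eq_nil_iff, List.mem_cons]
    constructor
    · rintro ⟨h1, h2⟩ h
      rcases h with h | h
      · subst h; simp at h1
      · exact ((ih (i + 1)).mp h2) h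
    · intro h
      refine ⟨?_, (ih (i + 1)).mpr (fun hm => h (Or.inr hm))⟩
      have : y ≠ c := fun he => h (Or.inl he.symm)
      simp [this]

theorem buildKey_get? (c : Char) : ∀ (cs : List Char) (d : PySem.Dict Char (List Int)) (i : Int),
    (buildKey d cs i).get? c =
      match d.get? c with
      | some l => some (l ++ strPos c cs i)
      | none => if strPos c cs i = [] then none else some (strPos c cs i) := by
  intro cs
  induction cs with
  | nil => intro d i; cases h : d.get? c <;> simp [buildKey, strPos, h]
  | cons x rest ih =>
    intro d i
    by_cases hx : x = c
    · subst hx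
      cases h : d.get? x with
      | some l =>
        simp only [buildKey, h]
        rw [ih]
        simp [PySem.Dict.get?_insert_self, strPos]
      | none =>
        simp only [buildKey, h]
        rw [ih]
        simp [PySem.Dict.get?_insert_self, strPos]
    · cases h : d.get? c with
      | some l =>
        simp only [buildKey]
        cases hxx : d.get? x <;>
          · rw [ih]
            rw [PySem.Dict.get?_insert_of_ne _ _ (Ne.symm hx), h]
            simp [strPos, hx]
      | none =>
        simp only [buildKey]
        cases hxx : d.get? x <;>
          · rw [ih]
            rw [PySem.Dict.get?_insert_of_ne _ _ (Ne.symm hx), h]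
            simp [strPos, hx]

theorem buildAll_get? (c : Char) : ∀ (keymap : List String) (d : PySem.Dict Char (List Int)),
    (keymap.foldl (fun d key => buildKey d key.toList 0) d).get? c =
      match d.get? c with
      | some l => some (l ++ allPos keymap c)
      | none => if allPos keymap c = [] then none else some (allPos keymap c) := by
  intro keymap
  induction keymap with
  | nil => intro d; cases h : d.get? c <;> simp [allPos, h]
  | cons k rest ih =>
    intro d
    simp only [List.foldl_cons]
    rw [ih]
    rw [buildKey_get? c]
    have hall : allPos (k :: rest) c = strPos c k.toList 0 ++ allPos rest c := by
      simp [allPos]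
    cases h : d.get? c with
    | some l => simp [hall, List.append_assoc]
    | none =>
      by_cases hs : strPos c k.toList 0 = []
      · simp [hall, hs]
      · have hne : strPos c k.toList 0 ++ allPos rest c ≠ [] := by
          intro he; exact hs (List.append_eq_nil_iff.mp he).1
        simp [hall, hs, hne]

theorem foldl_min_eq (x : Int) : ∀ (t : List Int), (∀ y ∈ t, x ≤ y) → t.foldl min x = x := by
  intro t
  induction t generalizing x with
  | nil => intro _; rfl
  | cons y rest ih =>
    intro h
    simp only [List.foldl_cons]
    rw [min_eq_left (h y (by simp))]
    exact ih x (fun z hz => h z (by simp [hz]))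

theorem min?_unique (l : List Int) (m : Int) (hm : m ∈ l) (hmin : ∀ y ∈ l, m ≤ y) :
    PySem.List.min? l (fun x => x) = some m := by
  cases h : PySem.List.min? l (fun x => x) with
  | none =>
    rw [PySem.List.min?_eq_none_iff] at h
    subst h; simp at hm
  | some m' =>
    have h1 : m' ∈ l := PySem.List.min?_mem h
    have h2 : m' ≤ m := PySem.List.min?_isMin h m hm
    have h3 : m ≤ m' := hmin m' h1
    rw [le_antisymm h2 h3]

theorem min?_strPos (c : Char) : ∀ (cs : List Char) (i : Int),
    PySem.List.min? (strPos c cs i) (fun x => x) =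
      (PySem.List.index? cs c).map (fun j => i + (j : Int) + 1) := by
  intro cs
  induction cs with
  | nil => intro i; simp [strPos, PySem.List.min?_eq_none_iff]
  | cons x rest ih =>
    intro i
    by_cases hx : x = c
    · subst hx
      have hcons : strPos x (x :: rest) i = (i + 1) :: strPos x rest (i + 1) := by
        simp [strPos]
      rw [hcons, PySem.List.min?_id_cons, PySem.List.index?_cons_self]
      rw [foldl_min_eq _ _ (fun y hy => by have := strPos_lb x rest (i + 1) y hy; omega)]
      simp
    · have hcons : strPos c (x :: rest) i = strPos c rest (i + 1) := by
        simp [strPos, hx]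
      rw [hcons, ih, PySem.List.index?_cons_of_ne rest hx]
      cases PySem.List.index? rest c
      · simp
      · simp; omega

theorem mem_allPos {keymap : List String} {c : Char} {x : Int} :
    x ∈ allPos keymap c ↔ ∃ k ∈ keymap, x ∈ strPos c k.toList 0 := by
  simp [allPos]

-- the heart: A's per-character dict-min equals B's direct rescan minimum
theorem bestB_eq_min_allPos (keymap : List String) (c : Char) :
    PySem.List.min? (allPos keymap c) (fun x => x) = bestB keymap c := by
  cases hb : bestB keymap c with
  | none =>
    rw [PySem.List.min?_eq_none_iff]
    unfold bestB at hb
    rw [PySem.List.min?_eq_none_iff] at hb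
    simp only [List.map_eq_nil_iff, List.filter_eq_nil_iff] at hb
    have : ∀ k ∈ keymap, strPos c k.toList 0 = [] := by
      intro k hk
      rw [strPos_eq_nil_iff]
      intro hc
      exact absurd (by simp [hc] : decide (c ∈ k.toList) = true) (by simpa using hb k hk)
    simp only [allPos, List.flatMap_eq_nil_iff]
    intro k hk; exact this k hk
  | some m =>
    unfold bestB at hb
    have hmem := PySem.List.min?_mem hb
    have hmin := PySem.List.min?_isMin hb
    simp only [List.mem_map, List.mem_filter] at hmem
    obtain ⟨k, ⟨hk, hck⟩, hmk⟩ := hmem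
    have hckm : c ∈ k.toList := by simpa using hck
    obtain ⟨j, hj⟩ := Option.isSome_iff_exists.mp (((PySem.List.index?_isSome_iff _ _).mpr hckm))
    have hmval : m = (j : Int) + 1 := by rw [← hmk, hj]; rfl
    have hmins : PySem.List.min? (strPos c k.toList 0) (fun x => x) = some ((j : Int) + 1) := by
      rw [min?_strPos, hj]; simp
    apply min?_unique
    · rw [hmval]
      exact mem_allPos.mpr ⟨k, hk, PySem.List.min?_mem hmins⟩
    · intro y hy
      obtain ⟨k', hk', hy'⟩ := mem_allPos.mp hy
      have hck' : c ∈ k'.toList := by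
        by_contra hc
        rw [← strPos_eq_nil_iff c k'.toList 0] at hc
        simp [hc] at hy'
      obtain ⟨j', hj'⟩ := Option.isSome_iff_exists.mp (((PySem.List.index?_isSome_iff _ _).mpr hck'))
      have hmins' : PySem.List.min? (strPos c k'.toList 0) (fun x => x) = some ((j' : Int) + 1) := by
        rw [min?_strPos, hj']; simp
      have h1 : (j' : Int) + 1 ≤ y := PySem.List.min?_isMin hmins' y hy'
      have h2 : m ≤ (j' : Int) + 1 := by
        have : ((j' : Int) + 1) ∈ (keymap.filter (fun key => c ∈ key.toList)).map
            (fun key => ((PySem.List.index? key.toList c).getD 0 : Int) + 1) := by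
          simp only [List.mem_map, List.mem_filter]
          exact ⟨k', ⟨hk', by simpa using hck'⟩, by rw [hj']; rfl⟩
        exact hmin _ this
      omega

-- per-character correspondence between the built dict and bestB
theorem charVal (keymap : List String) (c : Char) :
    (keymap.foldl (fun d key => buildKey d key.toList 0) PySem.Dict.empty).get? c =
      (bestB keymap c).map (fun _ => allPos keymap c) := by
  rw [buildAll_get? c keymap PySem.Dict.empty]
  simp only [PySem.Dict.get?_empty]
  cases hb : bestB keymap c with
  | none =>
    have := bestB_eq_min_allPos keymap c
    rw [hb, PySem.List.min?_eq_none_iff] at this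
    simp [this]
  | some v =>
    have := bestB_eq_min_allPos keymap c
    rw [hb] at this
    have hne : allPos keymap c ≠ [] := by
      intro he; rw [he, (PySem.List.min?_eq_none_iff _ _).mpr rfl] at this; simp at this
    simp [hne]

theorem cnt_eq (keymap : List String) : ∀ (cs : List Char) (acc : Int),
    aCnt (keymap.foldl (fun d key => buildKey d key.toList 0) PySem.Dict.empty) cs acc =
      bCnt keymap cs acc := by
  intro cs
  induction cs with
  | nil => intro acc; rfl
  | cons c rest ih =>
    intro acc
    have hc := charVal keymap c
    cases hb : bestB keymap c with
    | none =>
      rw [hb] at hc; simp only [Option.map_none] at hc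
      simp [aCnt, bCnt, hc, hb]
    | some v =>
      rw [hb] at hc; simp only [Option.map_some] at hc
      have hmin : PySem.List.min? (allPos keymap c) (fun x => x) = some v := by
        rw [bestB_eq_min_allPos, hb]
      simp [aCnt, bCnt, hc, hb, hmin, ih]

theorem foldl_append_map {α β : Type} (f : α → β) : ∀ (l : List α) (acc : List β),
    l.foldl (fun r t => r ++ [f t]) acc = acc ++ l.map f := by
  intro l
  induction l with
  | nil => intro acc; simp
  | cons x rest ih => intro acc; simp [ih]

-- ===== VERDICT (by name: the statement is the Claim_ definition above) =====
theorem solution_spec : Claim_equal_solution := by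
  intro keymap targets _
  unfold Spec_solution solution solution_alt
  simp only [foldl_append_map, List.nil_append]
  exact List.map_congr_left (fun t _ => cnt_eq keymap t.toList 0)
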